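-- pv_equiv track=rewrite | github.com/RangelGasharov/Python_Basics | algorithms/edabit_new_driving_license.py | driver_license
-- ===== SOURCE A (Python) =====
-- def driver_license(name, available_agents, other_people):
--     time = 20
--     current_rank = 1
--     people_list = separate_words(other_people) + [name]
--     people_list.sort()
--     for i in range(len(people_list)):
--         if people_list[i] == name:
--             current_rank += i
--             break
--     time_needed = time * max((current_rank - available_agents), 0) + time
--     return time_needed
--
-- def separate_words(text):
--     words = []
--     current_word = ""
--     for i in range(0, len(text)):
--         if text[i] == " ":
--             words.append(current_word)
--             current_word = ""
--         else:
--             current_word += text[i]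
--     words.append(current_word)
--     return words
-- ===== SOURCE B (Python) =====
-- def driver_license(name, available_agents, other_people):
--     # rank = 1 + number of queued names strictly before `name` alphabetically;
--     # no sorting needed: a single counting pass.
--     rank = 1 + sum(1 for w in other_people.split(" ") if w < name)
--     return 20 * max(rank - available_agents, 0) + 20
-- ===== Notes on version B (the rewrite author's own statement) =====
-- stated objective: faster
-- what changed: B replaces A's build-list + sort + linear rank scan by a single pass that counts the split words strictly less than the target name (the rank in the sorted list equals that count plus one).
import Mathlib
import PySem

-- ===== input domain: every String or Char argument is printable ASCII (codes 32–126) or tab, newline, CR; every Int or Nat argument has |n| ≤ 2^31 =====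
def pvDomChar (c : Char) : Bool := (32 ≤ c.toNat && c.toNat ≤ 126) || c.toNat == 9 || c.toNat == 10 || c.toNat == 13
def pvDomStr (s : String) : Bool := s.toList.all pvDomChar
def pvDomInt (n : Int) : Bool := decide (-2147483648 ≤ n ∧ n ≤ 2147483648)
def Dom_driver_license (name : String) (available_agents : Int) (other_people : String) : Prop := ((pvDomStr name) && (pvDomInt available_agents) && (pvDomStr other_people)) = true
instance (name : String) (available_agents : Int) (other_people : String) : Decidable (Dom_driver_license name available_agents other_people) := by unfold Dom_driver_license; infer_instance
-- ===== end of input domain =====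

-- B replaces A's build-list + sort + rank scan by one counting pass (rank = 1 + #words < name); proved equal on all inputs.

-- ===== PORT A =====
-- helper separate_words: char-by-char loop building current_word, flushing on ' '
def pvSepStep (st : List (List Char) × List Char) (c : Char) : List (List Char) × List Char :=
  if c = ' ' then (st.1 ++ [st.2], []) else (st.1, st.2 ++ [c])

def pvSeparateWords (text : List Char) : List (List Char) :=
  let p := text.foldl pvSepStep ([], [])
  p.1 ++ [p.2]

-- A's `for i in range(len(..)): if .. == name: current_rank += i; break`, starting from current_rank = 1
def pvRankLoop (lst : List (List Char)) (name : List Char) (i : Nat) : Int :=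
  match lst with
  | [] => 1
  | w :: rest => if w = name then 1 + (i : Int) else pvRankLoop rest name (i + 1)

def driver_license (name : String) (available_agents : Int) (other_people : String) : Int :=
  let time : Int := 20
  let people_list := pvSeparateWords other_people.toList ++ [name.toList]
  let sorted_list := PySem.List.sorted people_list (fun x => x) false
  let current_rank := pvRankLoop sorted_list name.toList 0
  time * max (current_rank - available_agents) 0 + time

-- ===== PORT B =====
def driver_license_alt (name : String) (available_agents : Int) (other_people : String) : Int :=
  let words := PySem.Chars.splitOn other_people.toList [' ']
  let rank : Int := 1 + (words.countP (fun w => decide (w < name.toList)) : Int)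
  20 * max (rank - available_agents) 0 + 20

-- ===== PRECONDITION & SPEC =====
def Spec_driver_license (name : String) (available_agents : Int) (other_people : String) (out : Int) : Prop := out = driver_license_alt name available_agents other_people
instance (name : String) (available_agents : Int) (other_people : String) (out : Int) : Decidable (Spec_driver_license name available_agents other_people out) := by unfold Spec_driver_license; infer_instance

-- ===== CLAIM (what is proved, stated in full; the proofs are below) =====
def Claim_equal_driver_license : Prop := ∀ (name : String) (available_agents : Int) (other_people : String), Dom_driver_license name available_agents other_people → Spec_driver_license name available_agents other_people (driver_license name available_agents other_people)

-- ===== LEMMAS AND PROOFS =====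

-- the two sorted-instance spellings (default LT vs LinearOrder.toLT) name the same list
theorem pv_sorted_inst_eq (L : List (List Char)) :
    PySem.List.sorted L (fun x => x) false
      = @PySem.List.sorted _ _ List.instLinearOrder.toLT LinearOrder.toDecidableLT L (fun x => x) false := by
  congr 1

-- the words accumulator only prepends: factor it out of the fold
theorem pv_foldl_sepStep_shift (s : List Char) (ws : List (List Char)) (cur : List Char) :
    s.foldl pvSepStep (ws, cur)
      = (ws ++ (s.foldl pvSepStep ([], cur)).1, (s.foldl pvSepStep ([], cur)).2) := by
  induction s generalizing ws cur with
  | nil => simp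
  | cons c rest ih =>
    by_cases hc : c = ' '
    · simp only [List.foldl_cons, pvSepStep, if_pos hc]
      rw [ih (ws ++ [cur]), ih ([] ++ [cur])]
      simp
    · simp only [List.foldl_cons, pvSepStep, if_neg hc]
      rw [ih ws]

-- splitOn.go with sep = [' '] computes A's separate_words accumulator loop
theorem pv_splitOn_go_eq (s : List Char) (cur : List Char) (acc : List (List Char))
    (fuel : Nat) (h : s.length < fuel) :
    PySem.Chars.splitOn.go [' '] fuel s cur acc
      = acc.reverse ++ ((s.foldl pvSepStep ([], cur.reverse)).1 ++ [(s.foldl pvSepStep ([], cur.reverse)).2]) := by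
  induction s generalizing fuel cur acc with
  | nil =>
    obtain ⟨f, rfl⟩ : ∃ f, fuel = f + 1 := ⟨fuel - 1, by omega⟩
    simp [PySem.Chars.splitOn.go]
  | cons c rest ih =>
    obtain ⟨f, rfl⟩ : ∃ f, fuel = f + 1 := ⟨fuel - 1, by omega⟩
    by_cases hc : c = ' '
    · subst hc
      have hpre : ([' '] : List Char).isPrefixOf (' ' :: rest) = true := by
        simp [List.isPrefixOf]
      simp only [PySem.Chars.splitOn.go, hpre, if_pos, List.length_cons, List.length_nil,
        List.drop_succ_cons, List.drop_zero]
      rw [ih _ _ f (by simpa using Nat.lt_of_succ_lt_succ h)]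
      conv_rhs => rw [List.foldl_cons]
      rw [show pvSepStep ([], cur.reverse) ' ' = ([cur.reverse], []) by simp [pvSepStep]]
      rw [pv_foldl_sepStep_shift rest [cur.reverse] []]
      simp
    · have hpre : ([' '] : List Char).isPrefixOf (c :: rest) = false := by
        simp only [List.isPrefixOf, Bool.and_eq_false_iff]
        left
        exact beq_eq_false_iff_ne.mpr (fun h' => hc h'.symm)
      simp only [PySem.Chars.splitOn.go, hpre, Bool.false_eq_true, if_false]
      rw [ih (c :: cur) acc f (by simpa using Nat.lt_of_succ_lt_succ h)]
      rw [List.foldl_cons]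
      simp only [pvSepStep, if_neg hc, List.reverse_cons]

theorem pv_splitOn_eq_separate (s : List Char) :
    PySem.Chars.splitOn s [' '] = pvSeparateWords s := by
  unfold PySem.Chars.splitOn pvSeparateWords
  rw [pv_splitOn_go_eq s [] [] (s.length + 1) (by omega)]
  simp

-- in a ≤-sorted list containing `name`, A's break-at-first-match loop returns 1 + i + #(elements < name)
theorem pv_rankLoop_eq (S : List (List Char)) (name : List Char)
    (hp : S.Pairwise (fun a b => a ≤ b)) (hm : name ∈ S) (i : Nat) :
    pvRankLoop S name i = 1 + (i : Int) + (S.countP (fun w => decide (w < name)) : Int) := by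
  induction S generalizing i with
  | nil => cases hm
  | cons w rest ih =>
    rw [List.pairwise_cons] at hp
    obtain ⟨hw, hrest⟩ := hp
    by_cases hwn : w = name
    · subst hwn
      have h0 : rest.countP (fun x => decide (x < w)) = 0 := by
        rw [List.countP_eq_zero]
        intro y hy
        simp only [decide_eq_true_eq]
        exact not_lt.mpr (hw y hy)
      simp [pvRankLoop, h0]
    · have hmem : name ∈ rest := by
        rcases List.mem_cons.mp hm with h | h
        · exact absurd h.symm hwn
        · exact h
      have hlt : w < name := lt_of_le_of_ne (hw name hmem) hwn
      rw [pvRankLoop, if_neg hwn, ih hrest hmem (i + 1), List.countP_cons]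
      simp only [decide_eq_true_eq, hlt, if_pos]
      push_cast
      ring

-- ===== VERDICT (by name: the statement is the Claim_ definition above) =====
theorem driver_license_spec : Claim_equal_driver_license := by
  intro name available_agents other_people _
  unfold Spec_driver_license driver_license driver_license_alt
  simp only []
  set L := pvSeparateWords other_people.toList ++ [name.toList] with hL
  have hmem : name.toList ∈ PySem.List.sorted L (fun x => x) false := by
    exact (PySem.List.mem_sorted L (fun x => x) false name.toList).mpr (by simp [hL])
  have hpair : (PySem.List.sorted L (fun x => x) false).Pairwise (fun a b => a ≤ b) := by
    rw [pv_sorted_inst_eq]; exact PySem.List.sorted_pairwise L (fun x => x)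
  have hperm : (PySem.List.sorted L (fun x => x) false).Perm L :=
    PySem.List.sorted_perm L (fun x => x) false
  rw [pv_rankLoop_eq _ _ hpair hmem 0, hperm.countP_eq]
  have hcnt : L.countP (fun w => decide (w < name.toList))
      = (pvSeparateWords other_people.toList).countP (fun w => decide (w < name.toList)) := by
    rw [hL, List.countP_append]
    simp
  rw [hcnt, pv_splitOn_eq_separate]
  push_cast
  ring_nf
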